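-- pv_equiv track=rewrite | github.com/arshadfaizan360/fpl_chatbot | fpl_chatbot_backend.py | get_current_gameweek
-- ===== SOURCE A (Python) =====
-- def get_current_gameweek(bootstrap_data):
--     """Finds the current gameweek, or the next one if the season hasn't started."""
--     if not bootstrap_data or 'events' not in bootstrap_data:
--         return None
--     for event in bootstrap_data.get('events', []):
--         if event.get('is_current'):
--             return event['id']
--     for event in bootstrap_data.get('events', []):
--         if event.get('is_next'):
--             return event['id']
--     return None
-- ===== SOURCE B (Python) =====
-- def get_current_gameweek(bootstrap_data):
--     """Finds the current gameweek, or the next one if the season hasn't started."""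
--     if not bootstrap_data or 'events' not in bootstrap_data:
--         return None
--     first_current = first_next = None
--     for ev in bootstrap_data['events']:
--         if first_current is None and ev.get('is_current'):
--             first_current = ev['id']
--         if first_next is None and ev.get('is_next'):
--             first_next = ev
--     if first_current is not None:
--         return first_current
--     return first_next['id'] if first_next is not None else None
-- ===== Notes on version B (the rewrite author's own statement) =====
-- stated objective: simpler
-- what changed: Replaces A's two sequential scans over the events list by a single pass that records the first is_current event's id and the first is_next event, choosing between them after the loop.
import Mathlib
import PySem

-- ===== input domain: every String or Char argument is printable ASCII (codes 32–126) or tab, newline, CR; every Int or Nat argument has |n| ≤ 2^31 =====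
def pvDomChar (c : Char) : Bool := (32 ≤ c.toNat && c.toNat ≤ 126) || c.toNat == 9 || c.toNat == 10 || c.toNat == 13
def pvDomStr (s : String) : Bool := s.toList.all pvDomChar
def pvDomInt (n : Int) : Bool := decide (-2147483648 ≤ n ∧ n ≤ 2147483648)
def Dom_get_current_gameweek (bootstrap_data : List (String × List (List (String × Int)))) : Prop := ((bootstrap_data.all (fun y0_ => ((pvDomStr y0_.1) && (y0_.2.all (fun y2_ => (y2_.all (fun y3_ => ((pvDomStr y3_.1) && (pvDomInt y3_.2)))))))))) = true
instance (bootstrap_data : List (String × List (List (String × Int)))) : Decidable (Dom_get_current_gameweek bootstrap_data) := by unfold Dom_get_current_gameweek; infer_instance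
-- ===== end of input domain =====

-- B replaces A's two sequential scans of the events list by one pass keeping the first
-- is_current id and the first is_next event (objective: simpler single traversal).

-- shared dict primitives on assoc lists (first match = Python dict lookup; exact on
-- assoc lists in insertion order) and Python truthiness of event.get(k) for int values
def pvGet (d : List (String × Int)) (k : String) : Option Int :=
  match d with
  | [] => none
  | (k', v) :: rest => if k' = k then some v else pvGet rest k

def pvGetEvents (d : List (String × List (List (String × Int)))) (k : String) :
    Option (List (List (String × Int))) :=
  match d with
  | [] => none
  | (k', v) :: rest => if k' = k then some v else pvGetEvents rest k

def pvTruthy (o : Option Int) : Bool :=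
  match o with
  | some v => v != 0
  | none => false

-- ===== PORT A =====
-- one for-loop of A: `some r` = the loop executed `return event['id']` (r = none models the
-- KeyError of event['id'], excluded by Pre_); `none` = the loop fell through
def pvA_loop (key : String) : List (List (String × Int)) → Option (Option Int)
  | [] => none
  | ev :: rest =>
      if pvTruthy (pvGet ev key) then some (pvGet ev "id") else pvA_loop key rest

def get_current_gameweek (bootstrap_data : List (String × List (List (String × Int)))) : Option Int :=
  if bootstrap_data.isEmpty || (pvGetEvents bootstrap_data "events").isNone then none
  else
    let events := (pvGetEvents bootstrap_data "events").getD []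
    match pvA_loop "is_current" events with
    | some r => r
    | none =>
        match pvA_loop "is_next" events with
        | some r => r
        | none => none

-- ===== PORT B =====
-- single fold: state = (first_current id if already found (inner none models the KeyError,
-- excluded by Pre_), first is_next event if already found)
def pvB_step (st : Option (Option Int) × Option (List (String × Int)))
    (ev : List (String × Int)) : Option (Option Int) × Option (List (String × Int)) :=
  (if st.1.isNone && pvTruthy (pvGet ev "is_current") then some (pvGet ev "id") else st.1,
   if st.2.isNone && pvTruthy (pvGet ev "is_next") then some ev else st.2)

def get_current_gameweek_alt (bootstrap_data : List (String × List (List (String × Int)))) : Option Int :=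
  if bootstrap_data.isEmpty || (pvGetEvents bootstrap_data "events").isNone then none
  else
    let events := (pvGetEvents bootstrap_data "events").getD []
    let st := events.foldl pvB_step (none, none)
    match st.1 with
    | some r => r
    | none =>
        match st.2 with
        | some ev => pvGet ev "id"
        | none => none

-- ===== PRECONDITION & SPEC =====
def pvHasId (o : Option (List (String × Int))) : Bool :=
  match o with
  | some ev => (pvGet ev "id").isSome
  | none => true

-- Pre_ excludes exactly the inputs on which A raises KeyError: the first is_current event
-- lacks 'id', or no event is_current and the first is_next event lacks 'id'.
def Pre_get_current_gameweek (bootstrap_data : List (String × List (List (String × Int)))) : Prop :=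
  pvHasId (((pvGetEvents bootstrap_data "events").getD []).find? (fun ev => pvTruthy (pvGet ev "is_current"))) = true ∧
  ((((pvGetEvents bootstrap_data "events").getD []).find? (fun ev => pvTruthy (pvGet ev "is_current"))).isNone →
    pvHasId (((pvGetEvents bootstrap_data "events").getD []).find? (fun ev => pvTruthy (pvGet ev "is_next"))) = true)
instance (bootstrap_data : List (String × List (List (String × Int)))) : Decidable (Pre_get_current_gameweek bootstrap_data) := by unfold Pre_get_current_gameweek; infer_instance

def pvWitness_get_current_gameweek : (List (String × List (List (String × Int)))) :=
  [("events", [[("id", 1), ("is_next", 1)], [("id", 2), ("is_current", 1)]])]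

def Spec_get_current_gameweek (bootstrap_data : List (String × List (List (String × Int)))) (out : Option Int) : Prop := out = get_current_gameweek_alt bootstrap_data
instance (bootstrap_data : List (String × List (List (String × Int)))) (out : Option Int) : Decidable (Spec_get_current_gameweek bootstrap_data out) := by unfold Spec_get_current_gameweek; infer_instance

-- ===== CLAIM (what is proved, stated in full; the proofs are below) =====
def Claim_equal_get_current_gameweek : Prop := ∀ (bootstrap_data : List (String × List (List (String × Int)))), Dom_get_current_gameweek bootstrap_data → Pre_get_current_gameweek bootstrap_data → Spec_get_current_gameweek bootstrap_data (get_current_gameweek bootstrap_data)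

-- ===== LEMMAS AND PROOFS =====
-- the fold computes (first_current hit of loop 1, first is_next event), with any
-- already-found state left untouched
theorem pvFold_eq (evs : List (List (String × Int))) :
    ∀ a b, evs.foldl pvB_step (a, b) =
      ((if a.isNone then pvA_loop "is_current" evs else a),
       (if b.isNone then evs.find? (fun e => pvTruthy (pvGet e "is_next")) else b)) := by
  induction evs with
  | nil =>
      intro a b
      cases a <;> cases b <;> simp [pvA_loop]
  | cons ev rest ih =>
      intro a b
      simp only [List.foldl_cons, pvB_step, pvA_loop, List.find?_cons]
      rw [ih]
      cases a <;> cases b <;>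
        by_cases hc : pvTruthy (pvGet ev "is_current") = true <;>
        by_cases hn : pvTruthy (pvGet ev "is_next") = true <;>
        simp [hc, hn]

theorem pvLoop_next_eq (evs : List (List (String × Int))) :
    pvA_loop "is_next" evs =
      (evs.find? (fun e => pvTruthy (pvGet e "is_next"))).map (fun ev => pvGet ev "id") := by
  induction evs with
  | nil => simp [pvA_loop]
  | cons ev rest ih =>
      by_cases h : pvTruthy (pvGet ev "is_next") = true <;>
        simp [pvA_loop, h, ih]

-- ===== VERDICT (by name: the statement is the Claim_ definition above) =====
theorem get_current_gameweek_spec : Claim_equal_get_current_gameweek := by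
  intro bd _ _
  unfold Spec_get_current_gameweek get_current_gameweek get_current_gameweek_alt
  by_cases hg : (bd.isEmpty || (pvGetEvents bd "events").isNone) = true
  · simp [hg]
  · simp only [hg, if_false, Bool.false_eq_true]
    rw [pvFold_eq]
    simp only [Option.isNone_none, if_true]
    cases h1 : pvA_loop "is_current" ((pvGetEvents bd "events").getD []) with
    | some r => rfl
    | none =>
        simp only []
        rw [pvLoop_next_eq]
        cases ((pvGetEvents bd "events").getD []).find? (fun e => pvTruthy (pvGet e "is_next")) <;> rfl
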